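-- pv_equiv track=rewrite | github.com/retrieva/instruction-following-retrieval | src/evaluation2/utils/constant.py | remove_extra_fields
-- ===== SOURCE A (Python) =====
-- def remove_extra_fields(data_list):
--     for idx, data in enumerate(data_list):
--         level = idx + 1
--         if level == 1:
--             data.pop('2', None)
--             data.pop('3', None)
--         if level == 2:
--             data.pop('3', None)
--             data.pop('1', None)
--         if level == 3:
--             data.pop('1', None)
--             data.pop('2', None)
--     return data_list
-- ===== SOURCE B (Python) =====
-- def remove_extra_fields(data_list):
--     # Only the first three dicts are ever touched: pop their key pairs directly.
--     if len(data_list) >= 1: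
--         data_list[0].pop('2', None)
--         data_list[0].pop('3', None)
--     if len(data_list) >= 2:
--         data_list[1].pop('3', None)
--         data_list[1].pop('1', None)
--     if len(data_list) >= 3:
--         data_list[2].pop('1', None)
--         data_list[2].pop('2', None)
--     return data_list
-- ===== Notes on version B (the rewrite author's own statement) =====
-- stated objective: simpler
-- what changed: B drops the enumerate loop over the whole list and instead pops the key pairs directly from the first three elements under length guards, since no other element is ever modified.
import Mathlib
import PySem

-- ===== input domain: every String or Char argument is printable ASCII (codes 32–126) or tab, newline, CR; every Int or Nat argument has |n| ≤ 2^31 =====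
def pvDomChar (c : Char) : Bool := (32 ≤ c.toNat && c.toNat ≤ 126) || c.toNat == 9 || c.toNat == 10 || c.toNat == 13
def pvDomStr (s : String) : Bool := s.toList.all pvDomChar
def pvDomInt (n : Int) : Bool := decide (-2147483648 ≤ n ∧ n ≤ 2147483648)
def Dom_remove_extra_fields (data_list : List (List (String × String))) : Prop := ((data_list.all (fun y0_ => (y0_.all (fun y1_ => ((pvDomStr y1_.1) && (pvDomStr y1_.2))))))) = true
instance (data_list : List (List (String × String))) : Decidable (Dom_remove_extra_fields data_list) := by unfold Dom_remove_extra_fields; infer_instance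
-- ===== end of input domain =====

-- B pops the key pairs directly from the first three elements (the only ones A ever touches)
-- instead of looping with enumerate over the whole list; simpler. Both Pythons mutate the
-- dicts in place identically; the equivalence proved here is about the returned value.

-- ===== PORT A =====
-- data.pop(k, None) on a dict, ported as PySem.Dict.erase on the association list
def pvPop (d : List (String × String)) (k : String) : List (String × String) :=
  ((PySem.Dict.mk d).erase k).items

def remove_extra_fields (data_list : List (List (String × String))) : List (List (String × String)) :=
  (PySem.List.enumerate data_list).map (fun p =>
    let idx := p.1
    let data := p.2
    let level := idx + 1
    let data := if level == 1 then pvPop (pvPop data "2") "3" else data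
    let data := if level == 2 then pvPop (pvPop data "3") "1" else data
    let data := if level == 3 then pvPop (pvPop data "1") "2" else data
    data)

-- ===== PORT B =====
-- the length-guarded direct pops of Source B, transcribed as a match on the first three cells
def remove_extra_fields_alt (data_list : List (List (String × String))) : List (List (String × String)) :=
  match data_list with
  | [] => []
  | [a] => [pvPop (pvPop a "2") "3"]
  | [a, b] => [pvPop (pvPop a "2") "3", pvPop (pvPop b "3") "1"]
  | a :: b :: c :: rest =>
      pvPop (pvPop a "2") "3" :: pvPop (pvPop b "3") "1" :: pvPop (pvPop c "1") "2" :: rest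

-- ===== PRECONDITION & SPEC =====
def Spec_remove_extra_fields (data_list : List (List (String × String))) (out : List (List (String × String))) : Prop := out = remove_extra_fields_alt data_list
instance (data_list : List (List (String × String))) (out : List (List (String × String))) : Decidable (Spec_remove_extra_fields data_list out) := by unfold Spec_remove_extra_fields; infer_instance

-- ===== CLAIM (what is proved, stated in full; the proofs are below) =====
def Claim_equal_remove_extra_fields : Prop := ∀ (data_list : List (List (String × String))), Dom_remove_extra_fields data_list → Spec_remove_extra_fields data_list (remove_extra_fields data_list)

-- ===== LEMMAS AND PROOFS =====

-- past index 2 the loop body of A leaves every element unchanged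
theorem pvMapTailId (xs : List (List (String × String))) (s : Int) (hs : 3 ≤ s) :
    (PySem.List.enumerate xs s).map (fun p =>
      let idx := p.1
      let data := p.2
      let level := idx + 1
      let data := if level == 1 then pvPop (pvPop data "2") "3" else data
      let data := if level == 2 then pvPop (pvPop data "3") "1" else data
      let data := if level == 3 then pvPop (pvPop data "1") "2" else data
      data) = xs := by
  induction xs generalizing s with
  | nil => simp [PySem.List.enumerate_nil]
  | cons x xs ih =>
      rw [PySem.List.enumerate_cons, List.map_cons, ih (s + 1) (by omega)]
      have h1 : (s + 1 == (1 : Int)) = false := by simp; omega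
      have h2 : (s + 1 == (2 : Int)) = false := by simp; omega
      have h3 : (s + 1 == (3 : Int)) = false := by simp; omega
      simp [h1, h2, h3]

-- ===== VERDICT (by name: the statement is the Claim_ definition above) =====
theorem remove_extra_fields_spec : Claim_equal_remove_extra_fields := by
  intro data_list _
  unfold Spec_remove_extra_fields remove_extra_fields remove_extra_fields_alt
  match data_list with
  | [] => simp [PySem.List.enumerate_nil]
  | [a] => simp [PySem.List.enumerate_cons, PySem.List.enumerate_nil]
  | [a, b] => simp [PySem.List.enumerate_cons, PySem.List.enumerate_nil]
  | a :: b :: c :: rest =>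
      rw [PySem.List.enumerate_cons, PySem.List.enumerate_cons, PySem.List.enumerate_cons,
          (show ((0:Int)+1+1+1) = 3 by norm_num)]
      simp only [List.map_cons]
      rw [pvMapTailId rest 3 (by omega)]
      norm_num
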